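-- pv_equiv track=rewrite | github.com/AILAB-CEFET-RJ/gcc1734 | src/rl/qll_train.py | _inject_defaults
-- ===== SOURCE A (Python) =====
-- from typing import Dict, List, Optional, Tuple
--
-- _APPROX_DEFAULTS: Dict[str, str] = {
--     "--num_episodes": "5000",
--     "--decay_rate": "0.0005",
--     "--learning_rate": "0.001",
--     "--gamma": "0.95",
--     "--max_steps": "500",
--     "--batch_size": "64",
--     "--hidden_dim": "64",
-- }
--
-- def _has_flag(argv: List[str], flag: str) -> bool:
--     for arg in argv:
--         if arg == flag or arg.startswith(f"{flag}="):
--             return True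
--     return False
--
-- def _inject_defaults(argv: List[str], agent: str) -> List[str]:
--     if agent not in ("linear", "replay", "neural"):
--         return argv
--
--     defaults: List[str] = []
--     for flag, value in _APPROX_DEFAULTS.items():
--         if not _has_flag(argv, flag):
--             defaults.extend([flag, value])
--     return defaults + argv
-- ===== SOURCE B (Python) =====
-- from typing import Dict, List
--
-- _APPROX_DEFAULTS: Dict[str, str] = {
--     "--num_episodes": "5000",
--     "--decay_rate": "0.0005",
--     "--learning_rate": "0.001",
--     "--gamma": "0.95",
--     "--max_steps": "500",
--     "--batch_size": "64",
--     "--hidden_dim": "64",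
-- }
--
-- def _inject_defaults(argv: List[str], agent: str) -> List[str]:
--     if agent not in ("linear", "replay", "neural"):
--         return argv
--
--     # Deletion-based: start from a copy of the defaults dict and make ONE pass
--     # over argv, deleting each arg's normalized flag name (text before the
--     # first '=') from it.  Whatever survives the pass IS the list of defaults
--     # to prepend -- no membership test of argv per flag is ever performed.
--     remaining = dict(_APPROX_DEFAULTS)
--     for arg in argv:
--         remaining.pop(arg.split("=", 1)[0], None)
--     return [tok for fv in remaining.items() for tok in fv] + argv
-- ===== Notes on version B (the rewrite author's own statement) =====
-- stated objective: alternative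
-- what changed: A rescans argv once per default flag (equality-or-prefix test) and appends missing ones; B instead copies the defaults dict and makes a single pass over argv deleting each arg's normalized key from it, then flattens whatever survives as the prefix -- the remaining dict itself is the answer, with no per-flag membership test.
import Mathlib
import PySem

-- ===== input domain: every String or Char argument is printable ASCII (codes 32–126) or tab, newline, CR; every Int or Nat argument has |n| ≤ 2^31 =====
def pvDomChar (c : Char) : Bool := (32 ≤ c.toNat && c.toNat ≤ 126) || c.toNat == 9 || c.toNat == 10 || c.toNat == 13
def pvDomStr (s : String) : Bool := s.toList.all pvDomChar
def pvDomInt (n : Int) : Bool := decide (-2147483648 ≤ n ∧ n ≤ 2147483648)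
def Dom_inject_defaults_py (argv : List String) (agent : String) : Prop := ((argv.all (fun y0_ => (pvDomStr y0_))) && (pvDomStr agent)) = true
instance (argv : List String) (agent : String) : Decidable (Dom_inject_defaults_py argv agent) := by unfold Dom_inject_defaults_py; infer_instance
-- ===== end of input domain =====

-- B replaces A's per-flag rescans of argv by a single deletion pass: it copies the
-- defaults dict, deletes each arg's normalized key from it while walking argv once,
-- and flattens what remains as the prefix; return value only, nothing is mutated.

-- ===== PORT A =====
-- the module constant _APPROX_DEFAULTS (a dict, as an association list in insertion order)
def pyApproxDefaults : List (String × String) :=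
  [("--num_episodes", "5000"), ("--decay_rate", "0.0005"), ("--learning_rate", "0.001"),
   ("--gamma", "0.95"), ("--max_steps", "500"), ("--batch_size", "64"), ("--hidden_dim", "64")]

-- helper _has_flag: scan argv, True on the first arg equal to flag or starting with flag+"="
def hasFlagA (argv : List String) (flag : String) : Bool :=
  argv.any (fun arg => arg == flag || PySem.Str.startswith arg (flag ++ "="))

def inject_defaults_py (argv : List String) (agent : String) : List String :=
  if agent == "linear" || agent == "replay" || agent == "neural" then
    let defaults :=
      pyApproxDefaults.foldl
        (fun acc fv => if !hasFlagA argv fv.1 then acc ++ [fv.1, fv.2] else acc) []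
    defaults ++ argv
  else argv

-- ===== PORT B =====
-- arg.split("=", 1)[0]: hand port, exact — the text before the first '=' (whole arg if none)
def keyOfB (arg : String) : String := String.ofList (arg.toList.takeWhile (fun c => c ≠ '='))

def inject_defaults_py_alt (argv : List String) (agent : String) : List String :=
  if agent == "linear" || agent == "replay" || agent == "neural" then
    -- remaining = dict(_APPROX_DEFAULTS); for arg in argv: remaining.pop(key, None)
    let remaining : PySem.Dict String String :=
      argv.foldl (fun d arg => d.erase (keyOfB arg)) (PySem.Dict.ofList pyApproxDefaults)
    -- [tok for fv in remaining.items() for tok in fv] + argv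
    remaining.items.flatMap (fun fv => [fv.1, fv.2]) ++ argv
  else argv

-- ===== PRECONDITION & SPEC =====
def Spec_inject_defaults_py (argv : List String) (agent : String) (out : List String) : Prop := out = inject_defaults_py_alt argv agent
instance (argv : List String) (agent : String) (out : List String) : Decidable (Spec_inject_defaults_py argv agent out) := by unfold Spec_inject_defaults_py; infer_instance

-- ===== CLAIM (what is proved, stated in full; the proofs are below) =====
def Claim_equal_inject_defaults_py : Prop := ∀ (argv : List String) (agent : String), Dom_inject_defaults_py argv agent → Spec_inject_defaults_py argv agent (inject_defaults_py argv agent)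

-- ===== LEMMAS AND PROOFS =====

-- char-level core: for a flag without '=', "arg equals flag or starts with flag ++ '='"
-- is exactly "the text of arg before its first '=' equals flag"
theorem takeWhile_eq_iff (f a : List Char) (hf : '=' ∉ f) :
    a.takeWhile (fun c => c ≠ '=') = f ↔ (a = f ∨ f ++ ['='] <+: a) := by
  induction f generalizing a with
  | nil =>
      cases a with
      | nil => simp
      | cons b a' =>
          by_cases hb : b = '='
          · subst hb
            simp [List.cons_prefix_cons]
          · simp [hb, List.cons_prefix_cons, Ne.symm hb]
  | cons c f' ih =>
      have hc : c ≠ '=' := fun h => hf (h ▸ List.mem_cons_self ..)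
      have hf' : '=' ∉ f' := fun h => hf (List.mem_cons_of_mem _ h)
      cases a with
      | nil => simp
      | cons b a' =>
          by_cases hb : b = '='
          · subst hb
            simp [List.cons_prefix_cons, hc, Ne.symm hc]
          · rw [List.takeWhile_cons, if_pos (by simpa using hb)]
            constructor
            · intro h
              injection h with hbc ht
              rcases (ih a' hf').1 ht with h1 | h1
              · exact Or.inl (by rw [hbc, h1])
              · refine Or.inr ?_
                rw [List.cons_append]
                exact List.cons_prefix_cons.mpr ⟨hbc.symm, h1⟩
            · rintro (h | h)
              · injection h with hbc ha
                have hself : f'.takeWhile (fun c => decide (c ≠ '=')) = f' :=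
                  List.takeWhile_eq_self_iff.mpr
                    (fun x hx => by simpa using fun h' : x = '=' => hf' (h' ▸ hx))
                rw [hbc, ha, hself]
              · rw [List.cons_append] at h
                obtain ⟨hcb, h'⟩ := List.cons_prefix_cons.mp h
                rw [(ih a' hf').2 (Or.inr h'), hcb]

-- string-level: A's per-argument test equals comparing the normalized key
theorem arg_test_eq (arg flag : String) (hf : '=' ∉ flag.toList) :
    (arg == flag || PySem.Str.startswith arg (flag ++ "=")) = (keyOfB arg == flag) := by
  have hsw : PySem.Str.startswith arg (flag ++ "=") = true ↔ flag.toList ++ ['='] <+: arg.toList := by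
    rw [PySem.Str.startswith_eq, PySem.Chars.startswith_iff]
    simp
  have hkey : (keyOfB arg == flag) = true ↔ arg.toList.takeWhile (fun c => c ≠ '=') = flag.toList := by
    simp [keyOfB, ← String.toList_inj, String.toList_ofList]
  have heq : (arg == flag) = true ↔ arg.toList = flag.toList := by
    simp [← String.toList_inj]
  rcases Bool.eq_false_or_eq_true (keyOfB arg == flag) with h | h
  · rw [h]
    rcases (takeWhile_eq_iff flag.toList arg.toList hf).1 (hkey.1 h) with h1 | h1
    · rw [heq.2 h1]
      simp
    · rw [hsw.2 h1]
      simp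
  · rw [h]
    have hk : ¬ (arg.toList.takeWhile (fun c => c ≠ '=') = flag.toList) :=
      fun hc => absurd (hkey.2 hc) (by simp [h])
    apply Bool.or_eq_false_iff.mpr
    constructor
    · cases he : (arg == flag) with
      | false => rfl
      | true =>
          exact absurd ((takeWhile_eq_iff flag.toList arg.toList hf).2 (Or.inl (heq.1 he))) hk
    · cases he : PySem.Str.startswith arg (flag ++ "=") with
      | false => rfl
      | true =>
          exact absurd ((takeWhile_eq_iff flag.toList arg.toList hf).2 (Or.inr (hsw.1 he))) hk

-- A's scan of argv for a '='-free flag equals "some arg of argv normalizes to it"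
theorem hasFlag_eq_any_key (argv : List String) (flag : String) (hf : '=' ∉ flag.toList) :
    hasFlagA argv flag = argv.any (fun arg => keyOfB arg == flag) := by
  unfold hasFlagA
  induction argv with
  | nil => rfl
  | cons a t ih =>
      rw [List.any_cons, List.any_cons, arg_test_eq a flag hf, ih]

-- B's deletion pass over argv, characterised: the items that survive are exactly
-- the entries of the starting dict whose key is no arg's normalized key
theorem foldl_erase_items (argv : List String) (d : PySem.Dict String String) :
    (argv.foldl (fun d arg => d.erase (keyOfB arg)) d).items
      = d.items.filter (fun fv => !argv.any (fun arg => keyOfB arg == fv.1)) := by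
  induction argv generalizing d with
  | nil => simp
  | cons a t ih =>
      rw [List.foldl_cons, ih (d.erase (keyOfB a))]
      show ((d.items.filter (fun p => !p.1 == keyOfB a)).filter _) = _
      rw [List.filter_filter]
      apply List.filter_congr
      intro fv _
      cases h : (keyOfB a == fv.1) with
      | false =>
          have h' : (fv.1 == keyOfB a) = false := by
            cases h2 : (fv.1 == keyOfB a) with
            | false => rfl
            | true => rw [BEq.comm] at h2; rw [h2] at h; exact h.symm ▸ rfl
          simp [List.any_cons, h, h']
      | true =>
          have h' : (fv.1 == keyOfB a) = true := by rw [BEq.comm]; exact h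
          simp [List.any_cons, h, h']

-- ===== VERDICT (by name: the statement is the Claim_ definition above) =====
theorem inject_defaults_py_spec : Claim_equal_inject_defaults_py := by
  intro argv agent _
  unfold Spec_inject_defaults_py inject_defaults_py inject_defaults_py_alt
  by_cases hag : (agent == "linear" || agent == "replay" || agent == "neural") = true
  · simp only [hag, if_true]
    congr 1
    have hof : (PySem.Dict.ofList pyApproxDefaults).items = pyApproxDefaults := by decide
    rw [foldl_erase_items, hof]
    rw [PySem.List.foldl_if_eq_foldl_filter, PySem.List.foldl_append_eq_flatMap]
    rw [List.nil_append]
    congr 1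
    apply List.filter_congr
    intro fv hmem
    have hf : '=' ∉ fv.1.toList := by fin_cases hmem <;> decide
    rw [hasFlag_eq_any_key argv fv.1 hf]
  · simp [hag]
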